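-- pv_equiv track=rewrite | github.com/philipwilsonTHG/psh | psh/expansion/variable.py | _split_pattern_replacement
-- ===== SOURCE A (Python) =====
-- def _split_pattern_replacement(operand: str):
--     """Split pattern/replacement handling escaped slashes."""
--     i = 0
--     pattern_parts = []
--
--     while i < len(operand):
--         if i + 1 < len(operand) and operand[i:i+2] == '\\/':
--             pattern_parts.append('\\/')
--             i += 2
--         elif operand[i] == '/':
--             # Found separator
--             pattern = ''.join(pattern_parts)
--             replacement = operand[i+1:] if i+1 < len(operand) else ''
--             return pattern, replacement
--         else:
--             pattern_parts.append(operand[i])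
--             i += 1
--
--     # No separator found
--     return None, None
-- ===== SOURCE B (Python) =====
-- def _split_pattern_replacement(operand: str):
--     """Split pattern/replacement at the first slash not preceded by a backslash,
--     tracking only the previous character instead of accumulating pattern parts."""
--     prev = ''
--     for i, ch in enumerate(operand):
--         if ch == '/' and prev != '\\':
--             return operand[:i], operand[i + 1:]
--         prev = ch
--     return None, None
-- ===== Notes on version B (the rewrite author's own statement) =====
-- stated objective: simpler
-- what changed: A consumes the string with a two-character lookahead for an escaped-slash pair while appending pattern pieces to a list it later joins; B makes one enumerate pass remembering only the previous character and slices the operand at the first slash whose predecessor is not a backslash.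
import Mathlib
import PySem

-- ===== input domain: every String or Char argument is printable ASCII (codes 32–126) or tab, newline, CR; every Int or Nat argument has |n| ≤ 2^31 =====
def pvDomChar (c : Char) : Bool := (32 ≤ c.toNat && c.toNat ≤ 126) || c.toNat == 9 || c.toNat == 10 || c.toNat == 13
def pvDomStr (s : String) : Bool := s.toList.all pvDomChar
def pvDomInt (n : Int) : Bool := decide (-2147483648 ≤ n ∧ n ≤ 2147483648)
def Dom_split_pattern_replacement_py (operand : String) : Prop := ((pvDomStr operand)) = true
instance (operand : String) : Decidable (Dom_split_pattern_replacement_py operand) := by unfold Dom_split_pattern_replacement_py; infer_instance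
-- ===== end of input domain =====

-- B replaces A's lookahead scan with an accumulated parts list by a single enumerate pass that
-- remembers only the previous character and slices the operand at the first unescaped '/' (simpler).

-- ===== PORT A =====
-- while-loop over index i with pattern_parts accumulator; operand[i:i+2] is (s.drop i).take 2
-- (= PySem.List.slice with natural bounds, exact), ''.join is PySem.Chars.join [].
def pvA_go (s : List Char) (i : Nat) (parts : List (List Char)) : Option String × Option String :=
  if h : i < s.length then
    if i + 1 < s.length ∧ (s.drop i).take 2 = ['\\', '/'] then
      pvA_go s (i + 2) (parts ++ [['\\', '/']])
    else if s[i] = '/' then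
      (some (String.ofList (PySem.Chars.join [] parts)),
       some (String.ofList (if i + 1 < s.length then s.drop (i + 1) else [])))
    else
      pvA_go s (i + 1) (parts ++ [[s[i]]])
  else (none, none)
termination_by s.length - i

def split_pattern_replacement_py (operand : String) : Option String × Option String :=
  pvA_go operand.toList 0 []

-- ===== PORT B =====
-- for i, ch in enumerate(operand): first '/' with prev != '\' splits; prev = '' is [].
def pvB_go (s : List Char) (prev : List Char) : List (Int × Char) → Option String × Option String
  | [] => (none, none)
  | (i, ch) :: tl =>
    if ch = '/' ∧ prev ≠ ['\\'] then
      (some (String.ofList (PySem.List.slice s none (some i))),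
       some (String.ofList (PySem.List.slice s (some (i + 1)) none)))
    else pvB_go s [ch] tl

def split_pattern_replacement_py_alt (operand : String) : Option String × Option String :=
  pvB_go operand.toList [] (PySem.List.enumerate operand.toList 0)

-- ===== PRECONDITION & SPEC =====
def Spec_split_pattern_replacement_py (operand : String) (out : Option String × Option String) : Prop := out = split_pattern_replacement_py_alt operand
instance (operand : String) (out : Option String × Option String) : Decidable (Spec_split_pattern_replacement_py operand out) := by unfold Spec_split_pattern_replacement_py; infer_instance

-- ===== CLAIM (what is proved, stated in full; the proofs are below) =====
def Claim_equal_split_pattern_replacement_py : Prop := ∀ (operand : String), Dom_split_pattern_replacement_py operand → Spec_split_pattern_replacement_py operand (split_pattern_replacement_py operand)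

-- ===== LEMMAS AND PROOFS =====

lemma pv_join_append (ps : List (List Char)) (x : List Char) :
    PySem.Chars.join [] (ps ++ [x]) = PySem.Chars.join [] ps ++ x := by
  simp only [PySem.Chars.join]
  induction ps with
  | nil => simp [List.intercalate]
  | cons h t ih =>
    cases t with
    | nil => simp [List.intercalate]
    | cons a b => simp_all [List.intercalate]

lemma pv_main (s : List Char) :
    ∀ (n i : Nat) (parts : List (List Char)) (prev : List Char),
      s.length - i ≤ n → i ≤ s.length →
      PySem.Chars.join [] parts = s.take i →
      (prev = ['\\'] → s[i]? ≠ some '/') →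
      pvA_go s i parts = pvB_go s prev (PySem.List.enumerate (s.drop i) (i : Int)) := by
  intro n
  induction n with
  | zero =>
    intro i parts prev hn hi _ _
    have hie : i = s.length := by omega
    rw [pvA_go]
    simp [hie, pvB_go]
  | succ m ih =>
    intro i parts prev hn hi hjoin hprev
    by_cases h : i < s.length
    · have hdrop : s.drop i = s[i] :: s.drop (i + 1) := List.drop_eq_getElem_cons h
      by_cases hesc : i + 1 < s.length ∧ (s.drop i).take 2 = ['\\', '/']
      · -- escaped slash: A consumes two chars; B takes two non-splitting steps
        obtain ⟨h1, h2⟩ := hesc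
        have hdrop1 : s.drop (i + 1) = s[i + 1] :: s.drop (i + 2) := List.drop_eq_getElem_cons h1
        have e0 : (s.drop i).take 2 = [s[i], s[i + 1]] := by rw [hdrop, hdrop1]; rfl
        have hci : s[i] = '\\' ∧ s[i + 1] = '/' := by simpa using e0.symm.trans h2
        rw [pvA_go, dif_pos h, if_pos (And.intro h1 h2)]
        rw [hdrop, hdrop1, PySem.List.enumerate_cons, PySem.List.enumerate_cons]
        rw [pvB_go, if_neg (by simp [hci.1]), pvB_go, if_neg (by simp [hci.1, hci.2])]
        have hcast : (i : Int) + 1 + 1 = ((i + 2 : Nat) : Int) := by push_cast; ring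
        rw [hcast]
        exact ih (i + 2) (parts ++ [['\\', '/']]) [s[i + 1]] (by omega) (by omega)
          (by rw [pv_join_append, hjoin, List.take_add_one, List.take_add_one]
              simp [List.getElem?_eq_getElem h, List.getElem?_eq_getElem h1, hci.1, hci.2])
          (by intro hc; simp [hci.2] at hc)
      · by_cases hsl : s[i] = '/'
        · -- unescaped separator: both return the split
          rw [pvA_go, dif_pos h, if_neg hesc, if_pos hsl]
          rw [hdrop, PySem.List.enumerate_cons, pvB_go]
          have hpr : prev ≠ ['\\'] := fun hc =>
            hprev hc (by simp [List.getElem?_eq_getElem h, hsl])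
          rw [if_pos (And.intro hsl hpr)]
          have e1 : PySem.List.slice s none (some (i : Int)) = s.take i :=
            PySem.List.slice_to_natCast s i
          have hcast : (i : Int) + 1 = ((i + 1 : Nat) : Int) := by push_cast; ring
          have e2 : PySem.List.slice s (some ((i : Int) + 1)) none = s.drop (i + 1) := by
            rw [hcast]; exact PySem.List.slice_from_natCast s (i + 1)
          rw [e1, e2, hjoin]
          by_cases h1 : i + 1 < s.length
          · simp [h1]
          · simp [h1, List.drop_eq_nil_of_le (by omega : s.length ≤ i + 1)]
        · -- ordinary character: both advance one step
          rw [pvA_go, dif_pos h, if_neg hesc, if_neg hsl]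
          rw [hdrop, PySem.List.enumerate_cons, pvB_go, if_neg (by simp [hsl])]
          have hcast : (i : Int) + 1 = ((i + 1 : Nat) : Int) := by push_cast; ring
          rw [hcast]
          exact ih (i + 1) (parts ++ [[s[i]]]) [s[i]] (by omega) (by omega)
            (by rw [pv_join_append, hjoin, List.take_add_one]
                simp [List.getElem?_eq_getElem h])
            (by intro hc hc2
                simp only [List.cons.injEq, and_true] at hc
                by_cases h1 : i + 1 < s.length
                · have hgv : s[i + 1] = '/' := by
                    simpa [List.getElem?_eq_getElem h1] using hc2
                  exact hesc ⟨h1, by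
                    rw [hdrop, List.drop_eq_getElem_cons h1]
                    simp [hc, hgv]⟩
                · rw [List.getElem?_eq_none_iff.mpr (by omega : s.length ≤ i + 1)] at hc2
                  simp at hc2)
    · have hie : i = s.length := by omega
      rw [pvA_go]
      simp [hie, pvB_go]

-- ===== VERDICT (by name: the statement is the Claim_ definition above) =====
theorem split_pattern_replacement_py_spec : Claim_equal_split_pattern_replacement_py := by
  intro operand _
  unfold Spec_split_pattern_replacement_py split_pattern_replacement_py split_pattern_replacement_py_alt
  have := pv_main operand.toList operand.toList.length 0 [] []
  simpa using this (by omega) (by omega) (by simp [PySem.Chars.join, List.intercalate]) (by simp)
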